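-- pv_equiv track=rewrite | github.com/xinyue097/medical-reasoning | medreason_eval.py | letters_from_options
-- ===== SOURCE A (Python) =====
-- from typing import Dict, List, Tuple, Optional
--
-- LETTER_LIST_10 = ["A", "B", "C", "D", "E", "F", "G", "H", "I", "J"]
--
-- def letters_from_options(options: Dict[str, str]) -> List[str]:
--     order = {c: i for i, c in enumerate(LETTER_LIST_10)}
--     seen = []
--     for k in options.keys():
--         kk = str(k).strip().upper()
--         if kk in order and kk not in seen:
--             seen.append(kk)
--     return sorted(seen, key=lambda x: order[x])
-- ===== SOURCE B (Python) =====
-- LETTER_LIST_10 = ["A", "B", "C", "D", "E", "F", "G", "H", "I", "J"]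
--
-- def letters_from_options(options):
--     present = {str(k).strip().upper() for k in options.keys()}
--     return [c for c in LETTER_LIST_10 if c in present]
-- ===== Notes on version B (the rewrite author's own statement) =====
-- stated objective: simpler
-- what changed: B builds a normalized set of the option keys once and emits letters by scanning the fixed canonical letter list in order, so the explicit seen-list dedup and the keyed sort of A disappear.
import Mathlib
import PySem

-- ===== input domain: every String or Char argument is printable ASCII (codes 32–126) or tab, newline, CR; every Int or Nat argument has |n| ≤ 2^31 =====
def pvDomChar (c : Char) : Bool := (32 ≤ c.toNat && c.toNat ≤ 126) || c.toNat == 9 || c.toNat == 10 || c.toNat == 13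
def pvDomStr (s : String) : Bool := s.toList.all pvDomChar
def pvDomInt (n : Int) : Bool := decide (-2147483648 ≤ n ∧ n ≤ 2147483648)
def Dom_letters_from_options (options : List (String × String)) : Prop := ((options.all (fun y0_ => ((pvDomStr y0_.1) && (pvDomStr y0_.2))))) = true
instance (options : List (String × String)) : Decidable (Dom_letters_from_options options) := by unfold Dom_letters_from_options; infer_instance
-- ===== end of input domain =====

-- B replaces A's collect-keys / seen-list dedup / keyed sort by one normalized key set
-- plus an ordered filter of the fixed canonical letter list (simpler; same cost).

set_option maxRecDepth 8192

-- LETTER_LIST_10 (module constant used by both programs)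
def pvLetterList : List String := ["A", "B", "C", "D", "E", "F", "G", "H", "I", "J"]

-- ===== PORT A =====
-- A-side helper: the dict comprehension {c: i for i, c in enumerate(LETTER_LIST_10)}, a closed constant.
def pvOrd : PySem.Dict String Int :=
  (PySem.List.enumerate pvLetterList 0).foldl (fun d p => d.insert p.2 p.1) PySem.Dict.empty

-- order[x] in the sort key cannot raise (every element of seen is a key of order), so getD 0 is exact there.
def letters_from_options (options : List (String × String)) : List String :=
  let order := pvOrd
  let seen : List String := options.foldl (fun seen kv =>
    let kk := PySem.Str.upper (PySem.Str.strip kv.1)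
    if order.contains kk && !(seen.contains kk) then seen ++ [kk] else seen) []
  PySem.List.sorted seen (fun x => order.getD x 0)

-- ===== PORT B =====
def letters_from_options_alt (options : List (String × String)) : List String :=
  let present : PySem.Set String :=
    PySem.Set.ofList (options.map (fun kv => PySem.Str.upper (PySem.Str.strip kv.1)))
  pvLetterList.filter (fun c => PySem.Set.contains present c)

-- ===== PRECONDITION & SPEC =====
def Spec_letters_from_options (options : List (String × String)) (out : List String) : Prop := out = letters_from_options_alt options
instance (options : List (String × String)) (out : List String) : Decidable (Spec_letters_from_options options out) := by unfold Spec_letters_from_options; infer_instance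

-- ===== CLAIM (what is proved, stated in full; the proofs are below) =====
def Claim_equal_letters_from_options : Prop := ∀ (options : List (String × String)), Dom_letters_from_options options → Spec_letters_from_options options (letters_from_options options)

-- ===== LEMMAS AND PROOFS =====

theorem pvOrd_eq : pvOrd = PySem.Dict.mk [("A",(0:Int)),("B",1),("C",2),("D",3),("E",4),("F",5),("G",6),("H",7),("I",8),("J",9)] := by decide

theorem pvOrd_contains (kk : String) : pvOrd.contains kk = pvLetterList.contains kk := by
  rw [pvOrd_eq, Bool.eq_iff_iff]
  simp only [PySem.Dict.contains, pvLetterList, List.contains, List.any_eq_true, List.elem_iff,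
    List.mem_cons, List.not_mem_nil, or_false, beq_iff_eq]
  constructor
  · rintro ⟨x, hx, rfl⟩
    rcases hx with h|h|h|h|h|h|h|h|h|h <;> subst h <;> simp
  · rintro (h|h|h|h|h|h|h|h|h|h) <;> subst h
    exacts [⟨_, Or.inl rfl, rfl⟩, ⟨_, Or.inr (Or.inl rfl), rfl⟩, ⟨_, Or.inr (Or.inr (Or.inl rfl)), rfl⟩, ⟨_, Or.inr (Or.inr (Or.inr (Or.inl rfl))), rfl⟩, ⟨_, Or.inr (Or.inr (Or.inr (Or.inr (Or.inl rfl)))), rfl⟩, ⟨_, Or.inr (Or.inr (Or.inr (Or.inr (Or.inr (Or.inl rfl))))), rfl⟩, ⟨_, Or.inr (Or.inr (Or.inr (Or.inr (Or.inr (Or.inr (Or.inl rfl)))))), rfl⟩, ⟨_, Or.inr (Or.inr (Or.inr (Or.inr (Or.inr (Or.inr (Or.inr (Or.inl rfl))))))), rfl⟩, ⟨_, Or.inr (Or.inr (Or.inr (Or.inr (Or.inr (Or.inr (Or.inr (Or.inr (Or.inl rfl)))))))), rfl⟩, ⟨_, Or.inr (Or.inr (Or.inr (Or.inr (Or.inr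 (Or.inr (Or.inr (Or.inr (Or.inr rfl)))))))), rfl⟩]

-- A's seen loop builds exactly set(normalized keys restricted to the letters), in first-appearance order.
theorem pv_seen_eq (options : List (String × String)) :
    (options.foldl (fun seen kv =>
        let kk := PySem.Str.upper (PySem.Str.strip kv.1)
        if pvOrd.contains kk && !(seen.contains kk) then seen ++ [kk] else seen) ([] : List String)) =
    PySem.Set.ofList ((options.map (fun kv => PySem.Str.upper (PySem.Str.strip kv.1))).filter
        (fun c => pvLetterList.contains c)) := by
  simp only [PySem.Set.ofList_eq_foldl, List.foldl_filter, List.foldl_map]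
  apply PySem.List.foldl_congr_mem
  intro s kv _
  simp only [pvOrd_contains]
  by_cases hp : PySem.Str.upper (PySem.Str.strip kv.1) ∈ pvLetterList <;>
    by_cases hs : PySem.Str.upper (PySem.Str.strip kv.1) ∈ s <;>
      simp [PySem.Set.add, PySem.Set.contains, hp, hs]

theorem pvPairwise : pvLetterList.Pairwise (fun a b => pvOrd.getD a 0 < pvOrd.getD b 0) := by decide

-- ===== VERDICT (by name: the statement is the Claim_ definition above) =====
theorem letters_from_options_spec : Claim_equal_letters_from_options := by
  intro options _
  show letters_from_options options = letters_from_options_alt options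
  simp only [letters_from_options, letters_from_options_alt]
  rw [pv_seen_eq]
  apply PySem.List.sorted_eq_of_perm_of_pairwise_lt
  · apply (List.perm_ext_iff_of_nodup ?_ ?_).mpr
    · intro x
      simp only [List.mem_filter, PySem.Set.contains, PySem.Set.mem_ofList, List.contains_iff_mem]
      constructor
      · rintro ⟨hl, hn⟩; exact ⟨hn, by simpa [List.contains_iff_mem] using hl⟩
      · rintro ⟨hn, hl⟩; exact ⟨by simpa [List.contains_iff_mem] using hl, hn⟩
    · exact (by decide : pvLetterList.Nodup).filter _
    · exact PySem.Set.nodup_ofList _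
  · exact pvPairwise.filter _
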